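-- pv_equiv track=rewrite | github.com/SmartDeltaFraunhoferFOKUS/INIMASU | VisualizeIssues/visualizeHelpFunctions.py | getOverview
-- ===== SOURCE A (Python) =====
-- import math
--
-- def getOverview(interval, body_length, time):
--     overview = {}
--     for i in range(len(body_length)):
--         if time[i] != None:
--             length = body_length[i]
--             key = math.floor(length/ interval)
--             if key in overview:
--                 overview[key].append(time[i])
--             else:
--                 overview[key] = [time[i]]
--     return dict(sorted(overview.items()))
-- ===== SOURCE B (Python) =====
-- def getOverview(interval, body_length, time):
--     pairs = [(l // interval, t) for l, t in zip(body_length, time) if t is not None]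
--     keys = sorted({k for k, _ in pairs})
--     return {k: [t for k2, t in pairs if k2 == k] for k in keys}
-- ===== Notes on version B (the rewrite author's own statement) =====
-- stated objective: alternative
-- what changed: Replaces the index loop that mutates dict buckets (append-or-create, then sort the items) by a filtered zip comprehension of (length//interval, time) pairs, a sorted set of the distinct keys, and one filter pass per key building the result dict directly in key order.
-- outside the precondition, e.g. on getOverview(0, [7], [None]): A returns {}, B returns {}
import Mathlib
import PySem

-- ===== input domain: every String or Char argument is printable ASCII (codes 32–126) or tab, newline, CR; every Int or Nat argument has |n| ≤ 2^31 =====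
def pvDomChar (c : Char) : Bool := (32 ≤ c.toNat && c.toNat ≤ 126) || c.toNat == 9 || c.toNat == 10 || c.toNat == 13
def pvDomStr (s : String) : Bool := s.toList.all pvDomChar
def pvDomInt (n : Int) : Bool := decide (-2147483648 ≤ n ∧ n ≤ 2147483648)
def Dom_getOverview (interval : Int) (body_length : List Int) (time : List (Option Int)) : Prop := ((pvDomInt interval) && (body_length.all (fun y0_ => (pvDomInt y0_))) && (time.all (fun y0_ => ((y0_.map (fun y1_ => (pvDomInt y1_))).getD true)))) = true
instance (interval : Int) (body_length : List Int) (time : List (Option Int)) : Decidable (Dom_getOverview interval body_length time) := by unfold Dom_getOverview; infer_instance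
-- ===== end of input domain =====

-- B replaces A's mutate-a-dict-of-buckets-then-sort loop by a filtered pair list, a sorted set
-- of the distinct keys and one filter pass per key (objective: alternative decomposition, not speed).

-- ===== PORT A =====
-- math.floor(length/interval) is ported as PySem.Int.floordiv: exact for |length|,|interval| ≤ 2^31,
-- interval ≠ 0 (the float quotient is within a half-ulp of the exact rational, whose distance to any
-- integer it does not equal is at least 1/|interval| > that half-ulp, so the float's floor is exact).
-- time[i] is ported with default none: for len(time) < len(body_length) Python raises IndexError,
-- excluded by Pre_; interval = 0 (ZeroDivisionError) is excluded by Pre_ as well.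
def getOverview (interval : Int) (body_length : List Int) (time : List (Option Int)) : List (Int × List Int) :=
  let overview : PySem.Dict Int (List Int) :=
    (PySem.List.pyRange 0 (body_length.length : Int)).foldl
      (fun ov i =>
        match PySem.List.pyGetD time i none with      -- if time[i] != None
        | none => ov
        | some t =>
          -- length = body_length[i]; key = math.floor(length / interval)
          if ov.contains (PySem.Int.floordiv (PySem.List.pyGetD body_length i 0) interval) then
            ov.modify (PySem.Int.floordiv (PySem.List.pyGetD body_length i 0) interval) [] (fun v => v ++ [t])   -- overview[key].append(time[i])
          else
            ov.insert (PySem.Int.floordiv (PySem.List.pyGetD body_length i 0) interval) [t])    -- overview[key] = [time[i]]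
      PySem.Dict.empty
  -- dict(sorted(overview.items())): dict keys are distinct, so Python's tuple comparison
  -- on the items reduces to comparison of the first components (exact here)
  PySem.List.sorted overview.items (fun p => p.1)

-- ===== PORT B =====
def getOverview_alt (interval : Int) (body_length : List Int) (time : List (Option Int)) : List (Int × List Int) :=
  let pairs := (body_length.zip time).filterMap (fun p => p.2.map (fun t => (PySem.Int.floordiv p.1 interval, t)))
  let keys := PySem.List.sorted (PySem.Set.ofList (pairs.map (fun q => q.1))) (fun k => k)
  keys.map (fun k => (k, (pairs.filter (fun q => q.1 == k)).map (fun q => q.2)))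

-- ===== PRECONDITION & SPEC =====
-- Pre_ excludes the inputs where Python A raises: interval = 0 (ZeroDivisionError) and body_length
-- longer than time (IndexError at the missing index). interval = 0 is excluded outright even in the
-- corner where no division is reached (every consulted time entry is None) and A returns {}.
def Pre_getOverview (interval : Int) (body_length : List Int) (time : List (Option Int)) : Prop :=
  interval ≠ 0 ∧ body_length.length ≤ time.length
instance (interval : Int) (body_length : List Int) (time : List (Option Int)) : Decidable (Pre_getOverview interval body_length time) := by unfold Pre_getOverview; infer_instance
def pvWitness_getOverview : Int × List Int × List (Option Int) := (2, [1, 5, 3, 9], [some 10, none, some 30, some 40])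

def Spec_getOverview (interval : Int) (body_length : List Int) (time : List (Option Int)) (out : List (Int × List Int)) : Prop := out = getOverview_alt interval body_length time
instance (interval : Int) (body_length : List Int) (time : List (Option Int)) (out : List (Int × List Int)) : Decidable (Spec_getOverview interval body_length time out) := by unfold Spec_getOverview; infer_instance

-- ===== CLAIM (what is proved, stated in full; the proofs are below) =====
def Claim_equal_getOverview : Prop := ∀ (interval : Int) (body_length : List Int) (time : List (Option Int)), Dom_getOverview interval body_length time → Pre_getOverview interval body_length time → Spec_getOverview interval body_length time (getOverview interval body_length time)

-- ===== LEMMAS AND PROOFS =====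

-- A's index loop, rewritten over Nat indices, equals the bucket fold over B's filtered pair list.
lemma pvAfold (interval : Int) : ∀ (bl : List Int) (tm : List (Option Int)) (d : PySem.Dict Int (List Int)),
    bl.length ≤ tm.length →
    (List.range bl.length).foldl
      (fun ov i =>
        match tm.getD i none with
        | none => ov
        | some t =>
          if ov.contains (PySem.Int.floordiv (bl.getD i 0) interval) then
            ov.modify (PySem.Int.floordiv (bl.getD i 0) interval) [] (fun v => v ++ [t])
          else
            ov.insert (PySem.Int.floordiv (bl.getD i 0) interval) [t]) d
    = ((bl.zip tm).filterMap (fun p => p.2.map (fun t => (PySem.Int.floordiv p.1 interval, t)))).foldl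
        (fun ov q => ov.modify q.1 [] (fun v => v ++ [q.2])) d := by
  intro bl
  induction bl with
  | nil => intro tm d _; rfl
  | cons b bl ih =>
    intro tm d h
    cases tm with
    | nil => simp at h
    | cons t? tm =>
      simp only [List.length_cons, List.range_succ_eq_map, List.foldl_cons, List.foldl_map,
        List.getD_cons_zero, List.getD_cons_succ, List.zip_cons_cons, List.filterMap_cons]
      cases t? with
      | none =>
        exact ih tm d (by simpa using h)
      | some t =>
        simp only [Option.map_some, List.foldl_cons]
        have hstep : (if d.contains (PySem.Int.floordiv b interval) then
              d.modify (PySem.Int.floordiv b interval) [] (fun v => v ++ [t])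
            else d.insert (PySem.Int.floordiv b interval) [t])
            = d.modify (PySem.Int.floordiv b interval) [] (fun v => v ++ [t]) := by
          by_cases hc : d.contains (PySem.Int.floordiv b interval) = true
          · simp [hc]
          · simp only [Bool.not_eq_true] at hc
            simp [hc, PySem.Dict.modify, PySem.Dict.getD_of_not_contains _ _ hc]
        rw [hstep]
        exact ih tm _ (by simpa using h)

-- sorting key-tagged records by their key is mapping over the sorted (duplicate-free) keys
lemma pvSortedMap (K : List Int) (g : Int → Int × List Int) (hg : ∀ k, (g k).1 = k) (hK : K.Nodup) :
    PySem.List.sorted (K.map g) (fun p => p.1) = (PySem.List.sorted K (fun k => k)).map g := by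
  apply PySem.List.sorted_eq_of_perm_of_pairwise_lt
  · exact (PySem.List.sorted_perm K (fun k => k) false).map g
  · have h1 := PySem.List.sorted_pairwise K (fun k => k)
    have h2 : (PySem.List.sorted K (fun k => k)).Nodup :=
      ((PySem.List.sorted_perm K (fun k => k) false).nodup_iff).mpr hK
    have h3 : (PySem.List.sorted K (fun k => k)).Pairwise (· < ·) :=
      (h1.and h2).imp (fun h => lt_of_le_of_ne h.1 h.2)
    rw [List.pairwise_map]
    exact h3.imp (fun h => by simpa [hg] using h)

-- ===== VERDICT (by name: the statement is the Claim_ definition above) =====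
theorem getOverview_spec : Claim_equal_getOverview := by
  intro interval bl tm _hdom hpre
  rcases hpre with ⟨_hiv, hlen⟩
  unfold Spec_getOverview getOverview getOverview_alt
  rw [PySem.List.pyRange_zero_natCast, List.foldl_map]
  simp only [PySem.List.pyGetD_natCast]
  rw [pvAfold interval bl tm PySem.Dict.empty hlen]
  set L := (bl.zip tm).filterMap (fun p => p.2.map (fun t => (PySem.Int.floordiv p.1 interval, t))) with hL
  set D := L.foldl (fun ov q => ov.modify q.1 [] (fun v => v ++ [q.2])) PySem.Dict.empty with hD
  have hnd : D.keys.Nodup := by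
    rw [hD]
    exact PySem.Dict.nodup_keys_foldl_modify_key L (fun q => q.1) [] (fun d q => fun v => v ++ [q.2])
      PySem.Dict.empty PySem.Dict.nodup_keys_empty
  have hkeys : D.keys = PySem.Set.ofList (L.map (fun q => q.1)) := by
    rw [hD, PySem.Dict.keys_foldl_modify_key L (fun q => q.1) [] (fun d q => fun v => v ++ [q.2])]
    rw [PySem.Dict.keys_empty]
    rfl
  have hgetD : ∀ k, D.getD k [] = (L.filter (fun q => q.1 == k)).map (fun q => q.2) := by
    intro k
    rw [hD]
    simpa using PySem.Dict.getD_foldl_modify_append L PySem.Dict.empty k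
  have hitems : D.items = D.keys.map (fun k => (k, (L.filter (fun q => q.1 == k)).map (fun q => q.2))) := by
    rw [PySem.Dict.items_eq_map_keys D hnd []]
    exact List.map_congr_left (fun k _ => by rw [hgetD k])
  rw [hitems, hkeys]
  exact pvSortedMap _ _ (fun k => rfl) (by rw [hkeys] at hnd; exact hnd)
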